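-- pv_equiv track=rewrite | github.com/hortonew/advent_of_code_2021 | day_3/main_3_2.py | convert_readings_to_frequency
-- ===== SOURCE A (Python) =====
-- from typing import Any, List
--
-- def convert_readings_to_frequency(readings: List[str]):
--     d = {}
--     for reading in readings:
--         for idx, item in enumerate(reading):
--             if idx+1 not in d:
--                 d[idx+1] = {'0': 0, '1': 0}
--
--             if item == '0':
--                 d[idx+1]['0'] += 1
--             else:
--                 d[idx+1]['1'] += 1
--
--     return d
-- ===== SOURCE B (Python) =====
-- from typing import List
--
-- def convert_readings_to_frequency(readings: List[str]):
--     # Column-major: for each bit position count readings that reach it and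
--     # the zeros among them; ones = total - zeros (matches A's else-branch).
--     if not readings:
--         return {}
--     maxlen = max(len(r) for r in readings)
--     d = {}
--     for pos in range(maxlen):
--         total = sum(1 for r in readings if len(r) > pos)
--         zeros = sum(1 for r in readings if len(r) > pos and r[pos] == '0')
--         d[pos + 1] = {'0': zeros, '1': total - zeros}
--     return d
-- ===== Notes on version B (the rewrite author's own statement) =====
-- stated objective: alternative
-- what changed: B traverses column-major (position-outer, reading-inner) over range(maxlen), counting per position the readings that reach it and the zeros among them, deriving the '1' count by subtraction, instead of A's row-major loop that grows and mutates a dict per character.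
import Mathlib
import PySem

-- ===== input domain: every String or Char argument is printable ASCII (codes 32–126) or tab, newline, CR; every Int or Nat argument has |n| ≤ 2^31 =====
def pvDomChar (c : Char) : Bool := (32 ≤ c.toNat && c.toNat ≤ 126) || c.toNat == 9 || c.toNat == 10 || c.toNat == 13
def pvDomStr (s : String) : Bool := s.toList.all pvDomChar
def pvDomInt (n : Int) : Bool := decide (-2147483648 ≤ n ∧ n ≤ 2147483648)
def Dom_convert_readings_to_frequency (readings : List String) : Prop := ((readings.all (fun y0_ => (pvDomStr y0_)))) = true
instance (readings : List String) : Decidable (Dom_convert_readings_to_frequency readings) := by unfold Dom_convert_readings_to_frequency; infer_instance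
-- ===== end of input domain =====

-- B recomputes the same per-position 0/1 frequency table column-major (position-outer) with
-- the '1' count obtained by subtraction; same return value, different traversal (objective: alternative).

-- ===== PORT A =====
-- body of A's inner loop: 'for idx, item in enumerate(reading): …'
def pvStepChar (d : PySem.Dict Int (PySem.Dict String Int)) (p : Int × Char) :
    PySem.Dict Int (PySem.Dict String Int) :=
  -- if idx+1 not in d: d[idx+1] = {'0': 0, '1': 0}
  let d1 := if d.contains (p.1 + 1) then d
            else d.insert (p.1 + 1) (PySem.Dict.mk [("0", 0), ("1", 0)])
  -- if item == '0': d[idx+1]['0'] += 1  else: d[idx+1]['1'] += 1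
  if p.2 = '0' then
    d1.insert (p.1 + 1) ((d1.getD (p.1 + 1) PySem.Dict.empty).insert "0"
      ((d1.getD (p.1 + 1) PySem.Dict.empty).getD "0" 0 + 1))
  else
    d1.insert (p.1 + 1) ((d1.getD (p.1 + 1) PySem.Dict.empty).insert "1"
      ((d1.getD (p.1 + 1) PySem.Dict.empty).getD "1" 0 + 1))

def convert_readings_to_frequency (readings : List String) : List (Int × List (String × Int)) :=
  ((readings.foldl (fun d reading => (PySem.List.enumerate reading.toList 0).foldl pvStepChar d)
      PySem.Dict.empty).items).map (fun kv => (kv.1, kv.2.items))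

-- ===== PORT B =====
def convert_readings_to_frequency_alt (readings : List String) : List (Int × List (String × Int)) :=
  if readings = [] then []
  else
    -- maxlen = max(len(r) for r in readings); readings ≠ [] so max? is some, the 0 default is unreachable
    let maxlen : Int := (PySem.List.max? (readings.map (fun r => (PySem.Str.len r : Int))) (fun x => x)).getD 0
    ((PySem.List.pyRange 0 maxlen 1).foldl (fun d pos =>
        -- total = sum(1 for r in readings if len(r) > pos)  (a 0/1-sum is countP)
        let total : Int := readings.countP (fun r => decide (pos < PySem.Str.len r))
        -- zeros = sum(1 for r in readings if len(r) > pos and r[pos] == '0')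
        let zeros : Int := readings.countP
          (fun r => decide (pos < PySem.Str.len r) && (PySem.Str.pyGet? r pos == some '0'))
        -- d[pos+1] = {'0': zeros, '1': total - zeros}
        d.insert (pos + 1) (PySem.Dict.mk [("0", zeros), ("1", total - zeros)]))
      PySem.Dict.empty).items.map (fun kv => (kv.1, kv.2.items))

-- ===== PRECONDITION & SPEC =====
def Spec_convert_readings_to_frequency (readings : List String) (out : List (Int × List (String × Int))) : Prop := out = convert_readings_to_frequency_alt readings
instance (readings : List String) (out : List (Int × List (String × Int))) : Decidable (Spec_convert_readings_to_frequency readings out) := by unfold Spec_convert_readings_to_frequency; infer_instance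

-- ===== CLAIM (what is proved, stated in full; the proofs are below) =====
def Claim_equal_convert_readings_to_frequency : Prop := ∀ (readings : List String), Dom_convert_readings_to_frequency readings → Spec_convert_readings_to_frequency readings (convert_readings_to_frequency readings)

-- ===== LEMMAS AND PROOFS =====

-- inner frequency dict {'0': z, '1': o}
def pvInner (z o : Int) : PySem.Dict String Int := PySem.Dict.mk [("0", z), ("1", o)]

-- canonical state of A's dict: keys 1..M, counts given by fz/fo
def pvMkD (M : Nat) (fz fo : Nat → Int) : PySem.Dict Int (PySem.Dict String Int) :=
  PySem.Dict.mk ((List.range M).map (fun (p : Nat) => ((p : Int) + 1, pvInner (fz p) (fo p))))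

def pvMaxlen (rs : List String) : Nat := rs.foldl (fun m r => max m r.toList.length) 0

def pvZ (rs : List String) (p : Nat) : Int :=
  (rs.countP (fun r => decide (p < r.toList.length ∧ r.toList.getD p 'x' = '0')) : Int)

def pvO (rs : List String) (p : Nat) : Int :=
  (rs.countP (fun r => decide (p < r.toList.length ∧ ¬ r.toList.getD p 'x' = '0')) : Int)

-- per-reading contribution at position p of a reading cs enumerated from s
def pvZc (cs : List Char) (s p : Nat) : Int :=
  if s ≤ p ∧ p - s < cs.length ∧ cs.getD (p - s) 'x' = '0' then 1 else 0

def pvOc (cs : List Char) (s p : Nat) : Int :=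
  if s ≤ p ∧ p - s < cs.length ∧ ¬ cs.getD (p - s) 'x' = '0' then 1 else 0

lemma pvMkD_congr (M : Nat) (fz fo gz go : Nat → Int)
    (hz : ∀ p, p < M → fz p = gz p) (ho : ∀ p, p < M → fo p = go p) :
    pvMkD M fz fo = pvMkD M gz go := by
  unfold pvMkD
  congr 1
  apply List.map_congr_left
  intro p hp
  rw [List.mem_range] at hp
  rw [hz p hp, ho p hp]

lemma pv_keys (M : Nat) (fz fo : Nat → Int) :
    (pvMkD M fz fo).keys = (List.range M).map (fun (p : Nat) => (p : Int) + 1) := by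
  unfold pvMkD
  rw [PySem.Dict.keys_mk, List.map_map]
  rfl

lemma pv_keys_nodup (M : Nat) (fz fo : Nat → Int) : (pvMkD M fz fo).keys.Nodup := by
  rw [pv_keys]
  refine List.Nodup.map ?_ List.nodup_range
  intro a b hab
  dsimp at hab
  omega

lemma pv_contains (M s : Nat) (fz fo : Nat → Int) :
    (pvMkD M fz fo).contains ((s : Int) + 1) = decide (s < M) := by
  rw [PySem.Dict.contains_eq_decide_mem_keys, pv_keys]
  simp only [List.mem_map, List.mem_range, decide_eq_decide]
  constructor
  · rintro ⟨p, hp, he⟩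
    omega
  · intro h; exact ⟨s, h, rfl⟩

lemma pv_getD (M s : Nat) (fz fo : Nat → Int) (h : s < M) :
    (pvMkD M fz fo).getD ((s : Int) + 1) PySem.Dict.empty = pvInner (fz s) (fo s) := by
  apply PySem.Dict.getD_of_mem_items
  · exact List.mem_map.2 ⟨s, List.mem_range.2 h, rfl⟩
  · exact pv_keys_nodup M fz fo

lemma pv_insert_existing (M s : Nat) (fz fo : Nat → Int) (z o : Int) (h : s < M) :
    (pvMkD M fz fo).insert ((s : Int) + 1) (pvInner z o)
      = pvMkD M (fun p => if p = s then z else fz p) (fun p => if p = s then o else fo p) := by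
  have hc : (pvMkD M fz fo).contains ((s : Int) + 1) = true := by
    rw [pv_contains]; simp [h]
  apply PySem.Dict.ext
  rw [PySem.Dict.items_insert_of_contains _ _ hc]
  show ((List.range M).map _).map _ = (List.range M).map _
  rw [List.map_map]
  apply List.map_congr_left
  intro p hp
  rw [List.mem_range] at hp
  by_cases hps : p = s
  · subst hps; simp
  · have hne : ¬ ((p : Int) + 1 = (s : Int) + 1) := by omega
    simp [Function.comp, hne, hps]

lemma pv_insert_fresh (M : Nat) (fz fo : Nat → Int) (z o : Int) :
    (pvMkD M fz fo).insert ((M : Int) + 1) (pvInner z o)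
      = pvMkD (M + 1) (fun p => if p = M then z else fz p) (fun p => if p = M then o else fo p) := by
  have hc : (pvMkD M fz fo).contains ((M : Int) + 1) = false := by
    rw [pv_contains]; simp
  apply PySem.Dict.ext
  rw [PySem.Dict.items_insert_of_not_contains _ _ hc]
  show (List.range M).map _ ++ _ = (List.range (M + 1)).map _
  rw [List.range_succ, List.map_append]
  congr 1
  · apply List.map_congr_left
    intro p hp
    rw [List.mem_range] at hp
    have hps : ¬ p = M := by omega
    simp [hps]
  · simp

lemma pvInner_insert0 (z o v : Int) : (pvInner z o).insert "0" v = pvInner v o := by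
  apply PySem.Dict.ext
  rw [PySem.Dict.items_insert_of_contains]
  · simp [pvInner]
  · simp [pvInner]

lemma pvInner_insert1 (z o v : Int) : (pvInner z o).insert "1" v = pvInner z v := by
  apply PySem.Dict.ext
  rw [PySem.Dict.items_insert_of_contains]
  · simp [pvInner]
  · simp [pvInner]

lemma pvInner_getD0 (z o : Int) : (pvInner z o).getD "0" 0 = z := by
  simp [pvInner, PySem.Dict.getD_eq_get?_getD, PySem.Dict.get?_mk_cons]

lemma pvInner_getD1 (z o : Int) : (pvInner z o).getD "1" 0 = o := by
  simp [pvInner, PySem.Dict.getD_eq_get?_getD, PySem.Dict.get?_mk_cons]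

lemma pv_step (M s : Nat) (fz fo : Nat → Int) (hs : s ≤ M) (c : Char) :
    pvStepChar (pvMkD M fz fo) ((s : Int), c)
      = pvMkD (max M (s + 1))
          (fun p => (if p < M then fz p else 0) + (if p = s ∧ c = '0' then 1 else 0))
          (fun p => (if p < M then fo p else 0) + (if p = s ∧ ¬ c = '0' then 1 else 0)) := by
  rcases Nat.lt_or_ge s M with hlt | hge
  · have hc : (pvMkD M fz fo).contains ((s : Int) + 1) = true := by
      rw [pv_contains]; simp [hlt]
    have hM : max M (s + 1) = M := by omega
    by_cases hcz : c = '0'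
    · simp only [pvStepChar, hc, if_true, hcz]
      rw [pv_getD M s fz fo hlt, pvInner_getD0, pvInner_insert0,
        pv_insert_existing M s fz fo _ _ hlt, hM]
      apply pvMkD_congr <;> intro p hp <;> by_cases hps : p = s <;>
        simp [hps, hp, hlt]
    · simp only [pvStepChar, hc, if_true, if_neg hcz]
      rw [pv_getD M s fz fo hlt, pvInner_getD1, pvInner_insert1,
        pv_insert_existing M s fz fo _ _ hlt, hM]
      apply pvMkD_congr <;> intro p hp <;> by_cases hps : p = s <;>
        simp [hps, hp, hlt, hcz]
  · have hsM : s = M := Nat.le_antisymm hs hge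
    subst hsM
    have hc : (pvMkD s fz fo).contains ((s : Int) + 1) = false := by
      rw [pv_contains]; simp
    have hM : max s (s + 1) = s + 1 := by omega
    have hfresh : (pvMkD s fz fo).insert ((s : Int) + 1) (PySem.Dict.mk [("0", 0), ("1", 0)])
        = pvMkD (s + 1) (fun p => if p = s then 0 else fz p) (fun p => if p = s then 0 else fo p) :=
      pv_insert_fresh s fz fo 0 0
    by_cases hcz : c = '0'
    · simp only [pvStepChar, hc, Bool.false_eq_true, if_false, hcz]
      rw [hfresh, pv_getD (s + 1) s _ _ (Nat.lt_succ_self s), pvInner_getD0, pvInner_insert0,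
        pv_insert_existing (s + 1) s _ _ _ _ (Nat.lt_succ_self s), hM]
      apply pvMkD_congr <;> intro p hp <;> by_cases hps : p = s <;>
        simp [hps] <;> omega
    · simp only [pvStepChar, hc, Bool.false_eq_true, if_false, if_neg hcz]
      rw [hfresh, pv_getD (s + 1) s _ _ (Nat.lt_succ_self s), pvInner_getD1, pvInner_insert1,
        pv_insert_existing (s + 1) s _ _ _ _ (Nat.lt_succ_self s), hM]
      apply pvMkD_congr <;> intro p hp <;> by_cases hps : p = s <;>
        simp [hps, hcz] <;> omega

lemma pv_inner_loop (cs : List Char) (s M : Nat) (fz fo : Nat → Int) (h : s ≤ M) :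
    (PySem.List.enumerate cs (s : Int)).foldl pvStepChar (pvMkD M fz fo)
      = pvMkD (max M (s + cs.length))
          (fun p => (if p < M then fz p else 0) + pvZc cs s p)
          (fun p => (if p < M then fo p else 0) + pvOc cs s p) := by
  induction cs generalizing s M fz fo with
  | nil =>
    simp only [PySem.List.enumerate_nil, List.foldl_nil, List.length_nil, Nat.add_zero,
      Nat.max_eq_left h]
    apply pvMkD_congr <;> intro p hp <;> simp [pvZc, pvOc, hp]
  | cons c cs ih =>
    rw [PySem.List.enumerate_cons, List.foldl_cons, pv_step M s fz fo h c]
    have hcast : (s : Int) + 1 = ((s + 1 : Nat) : Int) := by push_cast; ring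
    rw [hcast, ih (s + 1) (max M (s + 1)) _ _ (by omega)]
    have hMM : max (max M (s + 1)) (s + 1 + cs.length) = max M (s + (c :: cs).length) := by
      simp only [List.length_cons]; omega
    rw [hMM]
    have key : ∀ p, p < max M (s + (c :: cs).length) → ∀ X : Char → Prop, ∀ _ : DecidablePred X,
        ∀ f : Nat → Int,
        (if p < max M (s + 1) then
            (if p < M then f p else 0) + (if p = s ∧ X c then 1 else 0) else 0)
          + (if s + 1 ≤ p ∧ p - (s + 1) < cs.length ∧ X (cs.getD (p - (s + 1)) 'x') then 1 else 0)
        = (if p < M then f p else 0)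
          + (if s ≤ p ∧ p - s < (c :: cs).length ∧ X ((c :: cs).getD (p - s) 'x') then 1 else 0) := by
      intro p hp X _ f
      rcases Nat.lt_trichotomy p s with hps | hps | hps
      · have h1 : ¬ s ≤ p := by omega
        have h2 : ¬ s + 1 ≤ p := by omega
        have h3 : p < max M (s + 1) ↔ p < M := by omega
        have h4 : ¬ p = s := by omega
        simp [h1, h2, h3, h4]
        intro h5 h6
        exact absurd h6 (Nat.not_lt.mpr h5)
      · subst hps
        have h1 : p < max M (p + 1) := by omega
        have h2 : ¬ p + 1 ≤ p := by omega
        simp [h1, h2]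
      · have h1 : ¬ p = s := by omega
        have h2 : s ≤ p := by omega
        have h2' : s + 1 ≤ p := by omega
        have hsub : p - s = (p - (s + 1)) + 1 := by omega
        have hlen : p - (s + 1) < cs.length ↔ p - s < (c :: cs).length := by
          simp only [List.length_cons]; omega
        rw [hsub]
        simp only [List.getD_cons_succ, List.length_cons]
        by_cases hpM : p < M
        · have h3 : p < max M (s + 1) := by omega
          simp [h1, h2, h2', h3, hpM, show p - (s + 1) + 1 = p - s from by omega,
            show (p - (s + 1) < cs.length) ↔ (p - s < cs.length + 1) from by omega]
        · by_cases h3 : p < max M (s + 1)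
          · simp [h1, h2, h2', h3, hpM,
              show (p - (s + 1) < cs.length) ↔ (p - s < cs.length + 1) from by omega]
          · simp [h2, h2', h3, hpM,
              show (p - (s + 1) < cs.length) ↔ (p - s < cs.length + 1) from by omega]
    apply pvMkD_congr <;> intro p hp
    · have := key p hp (fun x => x = '0') (by infer_instance) fz
      simpa [pvZc] using this
    · have := key p hp (fun x => ¬ x = '0') (by infer_instance) fo
      simpa [pvOc] using this

lemma pv_foldl_max_init (rs : List String) :
    ∀ a : Nat, a ≤ rs.foldl (fun m r => max m r.toList.length) a := by
  induction rs with
  | nil => intro a; simp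
  | cons x t ih =>
    intro a
    exact le_trans (Nat.le_max_left _ _) (ih (max a x.toList.length))

lemma pv_foldl_max_mem (rs : List String) :
    ∀ (a : Nat) (r : String), r ∈ rs → r.toList.length ≤ rs.foldl (fun m r => max m r.toList.length) a := by
  induction rs with
  | nil => intro a r hr; simp at hr
  | cons x t ih =>
    intro a r hr
    rcases List.mem_cons.1 hr with h | h
    · subst h
      exact le_trans (Nat.le_max_right a _) (pv_foldl_max_init t _)
    · exact ih _ r h

lemma pv_len_le_maxlen (rs : List String) (r : String) (hr : r ∈ rs) :
    r.toList.length ≤ pvMaxlen rs :=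
  pv_foldl_max_mem rs 0 r hr

lemma pv_maxlen_append (rs : List String) (r : String) :
    pvMaxlen (rs ++ [r]) = max (pvMaxlen rs) r.toList.length := by
  simp [pvMaxlen, List.foldl_append]

lemma pvZ_big (rs : List String) (p : Nat) (h : pvMaxlen rs ≤ p) : pvZ rs p = 0 := by
  unfold pvZ
  rw [List.countP_eq_zero.mpr]
  · rfl
  · intro r hr
    have := pv_len_le_maxlen rs r hr
    intro hcon
    rcases of_decide_eq_true hcon with ⟨h1, -⟩
    omega

lemma pvO_big (rs : List String) (p : Nat) (h : pvMaxlen rs ≤ p) : pvO rs p = 0 := by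
  unfold pvO
  rw [List.countP_eq_zero.mpr]
  · rfl
  · intro r hr
    have := pv_len_le_maxlen rs r hr
    intro hcon
    rcases of_decide_eq_true hcon with ⟨h1, -⟩
    omega

lemma pvZ_append_singleton (rs : List String) (r : String) (p : Nat) :
    pvZ (rs ++ [r]) p = pvZ rs p + pvZc r.toList 0 p := by
  unfold pvZ pvZc
  rw [List.countP_append, List.countP_cons, List.countP_nil]
  push_cast
  by_cases h1 : p < r.toList.length <;> by_cases h2 : r.toList.getD p 'x' = '0' <;>
    simp []

lemma pvO_append_singleton (rs : List String) (r : String) (p : Nat) :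
    pvO (rs ++ [r]) p = pvO rs p + pvOc r.toList 0 p := by
  unfold pvO pvOc
  rw [List.countP_append, List.countP_cons, List.countP_nil]
  push_cast
  by_cases h1 : p < r.toList.length <;> by_cases h2 : r.toList.getD p 'x' = '0' <;>
    simp []

lemma pv_outer (rs : List String) :
    rs.foldl (fun d reading => (PySem.List.enumerate reading.toList 0).foldl pvStepChar d)
        PySem.Dict.empty
      = pvMkD (pvMaxlen rs) (pvZ rs) (pvO rs) := by
  induction rs using List.reverseRecOn with
  | nil => rfl
  | append_singleton rs r ih =>
    rw [List.foldl_append, ih, List.foldl_cons, List.foldl_nil,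
      show (0 : Int) = ((0 : Nat) : Int) from rfl,
      pv_inner_loop r.toList 0 (pvMaxlen rs) (pvZ rs) (pvO rs) (Nat.zero_le _)]
    have hM : max (pvMaxlen rs) (0 + r.toList.length) = pvMaxlen (rs ++ [r]) := by
      rw [pv_maxlen_append]; omega
    rw [hM]
    apply pvMkD_congr <;> intro p hp
    · rw [pvZ_append_singleton]
      by_cases hpM : p < pvMaxlen rs
      · rw [if_pos hpM]
      · rw [if_neg hpM, pvZ_big rs p (by omega)]
    · rw [pvO_append_singleton]
      by_cases hpM : p < pvMaxlen rs
      · rw [if_pos hpM]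
      · rw [if_neg hpM, pvO_big rs p (by omega)]

lemma pv_A_eq (rs : List String) :
    convert_readings_to_frequency rs
      = (List.range (pvMaxlen rs)).map
          (fun (p : Nat) => ((p : Int) + 1, [("0", pvZ rs p), ("1", pvO rs p)])) := by
  unfold convert_readings_to_frequency
  rw [pv_outer]
  show ((List.range _).map _).map _ = _
  rw [List.map_map]
  rfl

lemma pv_countP_split' (l : List String) (f g : String → Bool) :
    l.countP f = l.countP (fun r => f r && g r) + l.countP (fun r => f r && !g r) := by
  induction l with
  | nil => rfl
  | cons x t ih =>
    simp only [List.countP_cons, ih]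
    cases hf : f x <;> cases hg : g x <;> simp <;> omega

lemma pv_countP_split (l : List String) (p : Nat) :
    l.countP (fun r => decide (p < r.toList.length))
      = l.countP (fun r => decide (p < r.toList.length ∧ r.toList.getD p 'x' = '0'))
        + l.countP (fun r => decide (p < r.toList.length ∧ ¬ r.toList.getD p 'x' = '0')) := by
  rw [pv_countP_split' l (fun r => decide (p < r.toList.length))
    (fun r => decide (r.toList.getD p 'x' = '0'))]
  congr 1
  · apply List.countP_congr
    intro r hr
    simp
  · apply List.countP_congr
    intro r hr
    simp

lemma pv_foldl_max_cast (l : List Nat) :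
    ∀ a : Nat, (l.map (fun (n : Nat) => (n : Int))).foldl max (a : Int) = ((l.foldl max a : Nat) : Int) := by
  induction l with
  | nil => intro a; rfl
  | cons x t ih =>
    intro a
    simp only [List.map_cons, List.foldl_cons, ← Nat.cast_max, ih]

lemma pv_B_eq (rs : List String) :
    convert_readings_to_frequency_alt rs
      = (List.range (pvMaxlen rs)).map
          (fun (p : Nat) => ((p : Int) + 1, [("0", pvZ rs p), ("1", pvO rs p)])) := by
  unfold convert_readings_to_frequency_alt
  cases rs with
  | nil => rfl
  | cons r0 rest =>
    rw [if_neg (by simp)]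
    have hmax : (PySem.List.max? ((r0 :: rest).map (fun r => PySem.Str.len r)) (fun x => x)).getD 0
        = ((pvMaxlen (r0 :: rest) : Nat) : Int) := by
      rw [List.map_cons, PySem.List.max?_id_cons, Option.getD_some]
      have h1 : (rest.map fun r => PySem.Str.len r)
          = (rest.map fun r => r.toList.length).map (fun (n : Nat) => (n : Int)) := by
        rw [List.map_map]
        apply List.map_congr_left
        intro r _
        exact PySem.Str.len_eq r
      rw [PySem.Str.len_eq r0, h1, pv_foldl_max_cast, List.foldl_map]
      simp [pvMaxlen]
    show (List.map (fun kv => (kv.1, kv.2.items))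
      ((List.foldl (fun d pos => d.insert (pos + 1) (PySem.Dict.mk
          [("0", ((r0 :: rest).countP
              (fun r => decide (pos < PySem.Str.len r) && (PySem.Str.pyGet? r pos == some '0')) : Int)),
           ("1", ((r0 :: rest).countP (fun r => decide (pos < PySem.Str.len r)) : Int)
              - ((r0 :: rest).countP
              (fun r => decide (pos < PySem.Str.len r) && (PySem.Str.pyGet? r pos == some '0')) : Int))]))
        PySem.Dict.empty
        (PySem.List.pyRange 0
          ((PySem.List.max? ((r0 :: rest).map (fun r => PySem.Str.len r)) (fun x => x)).getD 0) 1)).items))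
      = _
    rw [hmax, PySem.List.pyRange_zero_nat]
    have hfresh := PySem.Dict.items_foldl_insert_fresh
      ((List.range (pvMaxlen (r0 :: rest))).map (fun (k : Nat) => (k : Int)))
      (fun pos => pos + 1)
      (fun pos => PySem.Dict.mk
        [("0", ((r0 :: rest).countP
            (fun r => decide (pos < PySem.Str.len r) && (PySem.Str.pyGet? r pos == some '0')) : Int)),
         ("1", ((r0 :: rest).countP (fun r => decide (pos < PySem.Str.len r)) : Int)
            - ((r0 :: rest).countP
            (fun r => decide (pos < PySem.Str.len r) && (PySem.Str.pyGet? r pos == some '0')) : Int))])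
      PySem.Dict.empty
      (by intro a _; exact PySem.Dict.contains_empty _)
      (by rw [List.map_map]
          refine List.Nodup.map ?_ List.nodup_range
          intro a b hab
          dsimp at hab
          omega)
    rw [hfresh, show PySem.Dict.empty.items = ([] : List (Int × PySem.Dict String Int)) from rfl,
      List.nil_append, List.map_map, List.map_map]
    apply List.map_congr_left
    intro k hk
    rw [List.mem_range] at hk
    have hz : (r0 :: rest).countP
          (fun r => decide ((k : Int) < PySem.Str.len r) && (PySem.Str.pyGet? r (k : Int) == some '0'))
        = (r0 :: rest).countP (fun r => decide (k < r.toList.length ∧ r.toList.getD k 'x' = '0')) := by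
      apply List.countP_congr
      intro r _
      rw [PySem.Str.len_eq, PySem.Str.pyGet?_eq, PySem.Chars.pyGet?_eq_listPyGet?,
        PySem.List.pyGet?_natCast]
      by_cases hkr : k < r.toList.length
      · have hki : (k : Int) < (r.toList.length : Int) := by omega
        simp [List.getD_eq_getElem?_getD]
        intro _
        rw [List.getElem?_eq_getElem hkr]
        simp
      · have hni : ¬ (k : Int) < (r.toList.length : Int) := by omega
        simp []
        intro h
        simp at hkr
        omega
    have htot : (r0 :: rest).countP (fun r => decide ((k : Int) < PySem.Str.len r))
        = (r0 :: rest).countP (fun r => decide (k < r.toList.length)) := by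
      apply List.countP_congr
      intro r _
      rw [PySem.Str.len_eq]
      simp
    have hsplit := pv_countP_split (r0 :: rest) k
    show ((k : Int) + 1, _) = ((k : Int) + 1, _)
    refine congrArg _ ?_
    show [("0", _), ("1", _)] = [("0", _), ("1", _)]
    unfold pvZ pvO
    rw [hz, htot]
    refine congrArg₂ _ (congrArg _ ?_) (congrArg (fun x => [("1", x)]) ?_)
    · rfl
    · rw [hsplit]
      push_cast
      ring

-- ===== VERDICT (by name: the statement is the Claim_ definition above) =====
theorem convert_readings_to_frequency_spec : Claim_equal_convert_readings_to_frequency := by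
  intro readings _
  unfold Spec_convert_readings_to_frequency
  rw [pv_A_eq, pv_B_eq]
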